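-- pv_equiv track=rewrite | github.com/hanazaki05/subtitlerefinerbyllm | memory.py | merge_glossary_entries
-- ===== SOURCE A (Python) =====
-- from typing import List, Dict, Any
--
-- def merge_glossary_entries(glossary: List[Dict[str, str]]) -> List[Dict[str, str]]:
--     """
--     Merge duplicate glossary entries.
--
--     Args:
--         glossary: List of glossary entries
--
--     Returns:
--         Deduplicated glossary
--     """
--     seen = {}
--     merged = []
--
--     for entry in glossary:
--         eng = entry.get("eng", "")
--         if not eng:
--             continue
--
--         if eng not in seen:
--             seen[eng] = entry
--             merged.append(entry)
--         else:
--             # Update existing entry if new one has more info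
--             existing = seen[eng]
--             if not existing.get("zh") and entry.get("zh"):
--                 existing["zh"] = entry["zh"]
--             if not existing.get("type") and entry.get("type"):
--                 existing["type"] = entry["type"]
--
--     return merged
-- ===== SOURCE B (Python) =====
-- def _fill(kept, other, field):
--     if not kept.get(field) and other.get(field):
--         kept[field] = other[field]
--
--
-- def merge_glossary_entries(glossary):
--     # Phase 1: group entries by their non-empty "eng" key, preserving first-seen order.
--     groups = {}
--     for entry in glossary:
--         eng = entry.get("eng", "")
--         if eng:
--             groups.setdefault(eng, []).append(entry)
--     # Phase 2: merge each group into its first entry (first non-empty value wins per field).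
--     result = []
--     for entries in groups.values():
--         kept = entries[0]
--         for other in entries[1:]:
--             _fill(kept, other, "zh")
--             _fill(kept, other, "type")
--         result.append(kept)
--     return result
-- ===== Notes on version B (the rewrite author's own statement) =====
-- stated objective: alternative
-- what changed: B replaces A's single pass that interleaves dedup and field-merging through a 'seen' dict by a two-phase decomposition: one grouping pass building an ordered dict from non-empty 'eng' to the list of its entries, then a per-group fold that merges each group into its first entry (first non-empty 'zh'/'type' wins).
import Mathlib
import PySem

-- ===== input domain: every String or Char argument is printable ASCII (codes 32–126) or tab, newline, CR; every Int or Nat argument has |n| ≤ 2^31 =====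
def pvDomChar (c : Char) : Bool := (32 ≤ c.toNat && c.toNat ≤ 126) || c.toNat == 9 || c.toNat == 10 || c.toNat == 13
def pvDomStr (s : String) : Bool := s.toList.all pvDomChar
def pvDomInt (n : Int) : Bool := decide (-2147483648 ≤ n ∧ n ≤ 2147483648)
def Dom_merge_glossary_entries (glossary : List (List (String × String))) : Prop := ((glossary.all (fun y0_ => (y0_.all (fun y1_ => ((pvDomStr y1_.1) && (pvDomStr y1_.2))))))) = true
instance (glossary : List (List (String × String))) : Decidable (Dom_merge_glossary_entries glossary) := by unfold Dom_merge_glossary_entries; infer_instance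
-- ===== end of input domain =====

-- B replaces A's incremental seen-dict single pass by a group-then-merge decomposition
-- (same cost; equivalence is about the RETURN value — both Pythons mutate the kept
-- first-occurrence dicts in place the same way).

-- truthiness of d.get(field): None and "" are falsy
def pvFilled (o : Option String) : Bool :=
  match o with
  | some s => !(s == "")
  | none => false

-- ===== PORT A =====
-- Python aliasing: A's `merged` holds references to the dicts stored in `seen`, which are
-- mutated in place; modeled exactly by keeping the merged KEYS in order and reading the
-- final objects out of `seen` after the loop.
def pvAStep (seen : PySem.Dict String (PySem.Dict String String)) (order : List String)
    (entry : PySem.Dict String String) :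
    PySem.Dict String (PySem.Dict String String) × List String :=
  let eng := entry.getD "eng" ""
  if eng == "" then (seen, order)
  else if !(seen.contains eng) then
    (seen.insert eng entry, order ++ [eng])
  else
    let existing := seen.getD eng PySem.Dict.empty
    let e1 := if !(pvFilled (existing.get? "zh")) && pvFilled (entry.get? "zh")
              then existing.insert "zh" (entry.getD "zh" "") else existing
    let e2 := if !(pvFilled (e1.get? "type")) && pvFilled (entry.get? "type")
              then e1.insert "type" (entry.getD "type" "") else e1
    (seen.insert eng e2, order)

def merge_glossary_entries (glossary : List (List (String × String))) :
    List (List (String × String)) :=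
  let st := glossary.foldl (fun st e => pvAStep st.1 st.2 (PySem.Dict.mk e))
    ((PySem.Dict.empty, []) : PySem.Dict String (PySem.Dict String String) × List String)
  st.2.map (fun k => (st.1.getD k PySem.Dict.empty).items)

-- ===== PORT B =====
def pvFill (kept other : PySem.Dict String String) (field : String) :
    PySem.Dict String String :=
  if !(pvFilled (kept.get? field)) && pvFilled (other.get? field)
  then kept.insert field (other.getD field "") else kept

-- groups.setdefault(eng, []).append(entry)  ==  modify eng [] (· ++ [entry])
def pvGStep (g : PySem.Dict String (List (PySem.Dict String String)))
    (e : List (String × String)) : PySem.Dict String (List (PySem.Dict String String)) :=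
  let entry := PySem.Dict.mk e
  let eng := entry.getD "eng" ""
  if eng == "" then g else g.modify eng [] (· ++ [entry])

def pvMergeGroup (entries : List (PySem.Dict String String)) : PySem.Dict String String :=
  match entries with
  | [] => PySem.Dict.empty  -- unreachable: every group is nonempty
  | kept :: rest => rest.foldl (fun kept other => pvFill (pvFill kept other "zh") other "type") kept

def merge_glossary_entries_alt (glossary : List (List (String × String))) :
    List (List (String × String)) :=
  let groups := glossary.foldl pvGStep PySem.Dict.empty
  groups.values.map (fun entries => (pvMergeGroup entries).items)

-- ===== PRECONDITION & SPEC =====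
def Spec_merge_glossary_entries (glossary : List (List (String × String))) (out : List (List (String × String))) : Prop := out = merge_glossary_entries_alt glossary
instance (glossary : List (List (String × String))) (out : List (List (String × String))) : Decidable (Spec_merge_glossary_entries glossary out) := by unfold Spec_merge_glossary_entries; infer_instance

-- ===== CLAIM (what is proved, stated in full; the proofs are below) =====
def Claim_equal_merge_glossary_entries : Prop := ∀ (glossary : List (List (String × String))), Dom_merge_glossary_entries glossary → Spec_merge_glossary_entries glossary (merge_glossary_entries glossary)

-- ===== LEMMAS AND PROOFS =====

-- loop invariant tying A's (seen, order) state to B's groups state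
def pvInv (seen : PySem.Dict String (PySem.Dict String String)) (order : List String)
    (g : PySem.Dict String (List (PySem.Dict String String))) : Prop :=
  order = g.keys ∧ seen.keys = g.keys ∧ g.keys.Nodup ∧
  (∀ k, g.contains k = true → g.getD k [] ≠ []) ∧
  (∀ k, seen.getD k PySem.Dict.empty = pvMergeGroup (g.getD k []))

lemma pvMergeGroup_append (l : List (PySem.Dict String String)) (e : PySem.Dict String String)
    (hl : l ≠ []) :
    pvMergeGroup (l ++ [e]) = pvFill (pvFill (pvMergeGroup l) e "zh") e "type" := by
  match l with
  | [] => exact absurd rfl hl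
  | h :: t => simp [pvMergeGroup, List.foldl_append]

lemma pvInv_step (seen : PySem.Dict String (PySem.Dict String String)) (order : List String)
    (g : PySem.Dict String (List (PySem.Dict String String)))
    (e : List (String × String)) (h : pvInv seen order g) :
    pvInv (pvAStep seen order (PySem.Dict.mk e)).1 (pvAStep seen order (PySem.Dict.mk e)).2
      (pvGStep g e) := by
  obtain ⟨h1, h2, h3, h4, h5⟩ := h
  have hcont : ∀ k, seen.contains k = g.contains k := fun k => by
    rw [PySem.Dict.contains_eq_decide_mem_keys, PySem.Dict.contains_eq_decide_mem_keys, h2]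
  simp only [pvAStep, pvGStep]
  by_cases hz : ((PySem.Dict.mk e).getD "eng" "" == "") = true
  · rw [if_pos hz, if_pos hz]
    exact ⟨h1, h2, h3, h4, h5⟩
  · rw [if_neg hz, if_neg hz]
    set entry := PySem.Dict.mk e with hentry
    set eng := entry.getD "eng" "" with hengdef
    by_cases hc : g.contains eng = true
    · -- eng already seen: A updates seen[eng] in place, B appends to eng's group
      rw [if_neg (by rw [hcont eng, hc]; simp)]
      have hgk : (g.modify eng [] (· ++ [entry])).keys = g.keys := by
        rw [PySem.Dict.keys_modify, PySem.Dict.keys_insert_of_contains _ _ hc]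
      refine ⟨by rw [h1, hgk], ?_, by rw [hgk]; exact h3, ?_, ?_⟩
      · rw [PySem.Dict.keys_insert_of_contains _ _ (by rw [hcont eng]; exact hc), h2, hgk]
      · intro k hk
        rw [PySem.Dict.getD_modify]
        by_cases hke : k = eng
        · rw [if_pos hke]
          simp
        · rw [if_neg hke]
          rw [PySem.Dict.contains_modify] at hk
          exact h4 k (by simpa [hke] using hk)
      · intro k
        rw [PySem.Dict.getD_insert, PySem.Dict.getD_modify]
        by_cases hke : k = eng
        · rw [if_pos hke, if_pos hke, pvMergeGroup_append _ _ (h4 eng hc), ← h5 eng]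
          rfl
        · rw [if_neg hke, if_neg hke]
          exact h5 k
    · -- new eng: A inserts the entry, B starts a singleton group
      have hcf : g.contains eng = false := by simpa using hc
      rw [if_pos (by rw [hcont eng, hcf]; simp)]
      have hgk : (g.modify eng [] (· ++ [entry])).keys = g.keys ++ [eng] := by
        rw [PySem.Dict.keys_modify, PySem.Dict.keys_insert_of_not_contains _ _ hcf]
      have hnm : eng ∉ g.keys := by
        rw [PySem.Dict.contains_eq_decide_mem_keys] at hcf
        simpa using hcf
      refine ⟨by rw [h1, hgk], ?_, ?_, ?_, ?_⟩
      · rw [PySem.Dict.keys_insert_of_not_contains _ _ (by rw [hcont eng]; exact hcf), h2, hgk]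
      · rw [hgk]
        exact List.Nodup.append h3 (List.nodup_singleton _) (by simpa using hnm)
      · intro k hk
        rw [PySem.Dict.getD_modify]
        by_cases hke : k = eng
        · rw [if_pos hke, PySem.Dict.getD_of_not_contains _ _ hcf]
          simp
        · rw [if_neg hke]
          rw [PySem.Dict.contains_modify] at hk
          exact h4 k (by simpa [hke] using hk)
      · intro k
        rw [PySem.Dict.getD_insert, PySem.Dict.getD_modify]
        by_cases hke : k = eng
        · rw [if_pos hke, if_pos hke, PySem.Dict.getD_of_not_contains _ _ hcf]
          rfl
        · rw [if_neg hke, if_neg hke]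
          exact h5 k

lemma pvInv_foldl (glossary : List (List (String × String)))
    (seen : PySem.Dict String (PySem.Dict String String)) (order : List String)
    (g : PySem.Dict String (List (PySem.Dict String String))) (h : pvInv seen order g) :
    pvInv (glossary.foldl (fun st e => pvAStep st.1 st.2 (PySem.Dict.mk e)) (seen, order)).1
      (glossary.foldl (fun st e => pvAStep st.1 st.2 (PySem.Dict.mk e)) (seen, order)).2
      (glossary.foldl pvGStep g) := by
  induction glossary generalizing seen order g with
  | nil => exact h
  | cons e rest ih =>
    simp only [List.foldl_cons]
    have hstep := pvInv_step seen order g e h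
    have hpair : (pvAStep seen order (PySem.Dict.mk e)).1 = (pvAStep seen order (PySem.Dict.mk e)).1 ∧
        (pvAStep seen order (PySem.Dict.mk e)).2 = (pvAStep seen order (PySem.Dict.mk e)).2 := ⟨rfl, rfl⟩
    have := ih (pvAStep seen order (PySem.Dict.mk e)).1 (pvAStep seen order (PySem.Dict.mk e)).2
      (pvGStep g e) hstep
    simpa using this

-- ===== VERDICT (by name: the statement is the Claim_ definition above) =====
theorem merge_glossary_entries_spec : Claim_equal_merge_glossary_entries := by
  intro glossary _
  unfold Spec_merge_glossary_entries
  simp only [merge_glossary_entries, merge_glossary_entries_alt]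
  have h0 : pvInv PySem.Dict.empty [] PySem.Dict.empty := by
    refine ⟨rfl, rfl, List.nodup_nil, ?_, ?_⟩
    · intro k hk
      rw [PySem.Dict.contains_empty] at hk
      exact absurd hk (by simp)
    · intro k
      rw [PySem.Dict.getD_empty, PySem.Dict.getD_empty]
      rfl
  obtain ⟨h1, h2, h3, h4, h5⟩ := pvInv_foldl glossary PySem.Dict.empty [] PySem.Dict.empty h0
  rw [h1, PySem.Dict.values_eq_map_keys _ h3 [], List.map_map]
  refine List.map_congr_left ?_
  intro k _
  simp only [Function.comp_apply, h5 k]
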